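-- pv_equiv track=rewrite | github.com/cloudkayl/CS-141 | HW12/compare_hashes.py | my_hash_func
-- ===== SOURCE A (Python) =====
-- def my_hash_func(key):
--     """
--     returns hash code by encoding in the following format: ord(key[0])^n-1 (for all even indices) + ord(key[1]) \
--     (for all odd indices) where n is the len of the string
--     :param key: the string its encoding(input to the hash function)
--     :return: encoded value of key
--     """
--     sum = 0
--     for pos in range(len(key)):
--         if pos % 2 == 0:
--             sum += pow(ord(key[pos]), len(key)-1)
--         else:
--             sum += ord(key[pos])
--     return int(sum)
-- ===== SOURCE B (Python) =====
-- def my_hash_func(key):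
--     n = len(key)
--     even_sum = sum(pow(ord(c), n - 1) for c in key[0::2])
--     odd_sum = sum(ord(c) for c in key[1::2])
--     return int(even_sum + odd_sum)
-- ===== Notes on version B (the rewrite author's own statement) =====
-- stated objective: alternative
-- what changed: B partitions the string by index parity using strided slices key[0::2] and key[1::2] and sums each part in its own pass (powers over the even slice, plain ord over the odd slice), eliminating A's indexed loop with its per-position parity conditional.
import Mathlib
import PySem

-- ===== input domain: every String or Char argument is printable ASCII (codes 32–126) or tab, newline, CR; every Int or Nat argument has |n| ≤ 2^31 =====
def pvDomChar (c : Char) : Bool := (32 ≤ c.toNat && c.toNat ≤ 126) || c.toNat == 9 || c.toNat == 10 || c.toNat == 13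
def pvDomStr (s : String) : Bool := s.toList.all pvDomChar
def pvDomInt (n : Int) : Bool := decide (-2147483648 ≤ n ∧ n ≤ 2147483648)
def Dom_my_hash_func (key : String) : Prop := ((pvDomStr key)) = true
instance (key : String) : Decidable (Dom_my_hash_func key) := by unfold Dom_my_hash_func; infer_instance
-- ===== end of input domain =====

-- B partitions the string into the two parity-strided slices key[0::2] / key[1::2] and
-- sums each slice in its own pass (objective: alternative decomposition, same cost).

-- ===== PORT A =====
-- Python's pow(ord(key[pos]), len(key)-1) is only evaluated inside the loop, where
-- len(key) ≥ 1, so the Nat subtraction n - 1 in the exponent is exact.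
def my_hash_func (key : String) : Int :=
  let cs := key.toList
  let n := cs.length
  (PySem.List.pyRange 0 (n : Int) 1).foldl
    (fun s pos =>
      if PySem.Int.mod pos 2 = 0 then
        s + (PySem.List.pyGetD (cs.map (fun c => (c.toNat : Int))) pos 0) ^ (n - 1)
      else s + PySem.List.pyGetD (cs.map (fun c => (c.toNat : Int))) pos 0) 0

-- ===== PORT B =====
-- key[0::2] / key[1::2] are PySem.List.slice? with step 2 on the code points; step 2 ≠ 0,
-- so slice? is always 'some' and '.getD []' is exact.
def my_hash_func_alt (key : String) : Int :=
  let cs := key.toList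
  let n := cs.length
  let evenSum := (((PySem.List.slice? cs (some 0) none 2).getD []).map
    (fun c => ((c.toNat : Int)) ^ (n - 1))).sum
  let oddSum := (((PySem.List.slice? cs (some 1) none 2).getD []).map
    (fun c => (c.toNat : Int))).sum
  evenSum + oddSum

-- ===== PRECONDITION & SPEC =====
def Spec_my_hash_func (key : String) (out : Int) : Prop := out = my_hash_func_alt key
instance (key : String) (out : Int) : Decidable (Spec_my_hash_func key out) := by unfold Spec_my_hash_func; infer_instance

-- ===== CLAIM (what is proved, stated in full; the proofs are below) =====
def Claim_equal_my_hash_func : Prop := ∀ (key : String), Dom_my_hash_func key → Spec_my_hash_func key (my_hash_func key)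

-- ===== LEMMAS AND PROOFS =====

-- the even- and odd-indexed elements of a list
mutual
def pvEvens {α : Type} : List α → List α
  | [] => []
  | x :: t => x :: pvOdds t
def pvOdds {α : Type} : List α → List α
  | [] => []
  | _ :: t => pvEvens t
end

lemma pv_getElem?_joint {α : Type} : ∀ xs : List α,
    (∀ k, (pvEvens xs)[k]? = xs[2 * k]?) ∧ (∀ k, (pvOdds xs)[k]? = xs[2 * k + 1]?) := by
  intro xs
  induction xs with
  | nil => simp [pvEvens, pvOdds]
  | cons x t ih =>
    constructor
    · intro k
      cases k with
      | zero => simp [pvEvens]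
      | succ k =>
        have h2 : 2 * (k + 1) = (2 * k + 1) + 1 := by omega
        simp only [pvEvens, h2, List.getElem?_cons_succ]
        exact ih.2 k
    · intro k
      simp only [pvOdds, List.getElem?_cons_succ]
      exact ih.1 k

-- xs[a::2] is every other element of xs.drop a
lemma slice?_step_two {α : Type} (xs : List α) (a : Nat) :
    PySem.List.slice? xs (some (a : Int)) none 2 = some (pvEvens (xs.drop a)) := by
  simp only [PySem.List.slice?, PySem.List.sliceIndices]
  have hlt : ¬ ((a:Int) < 0) := not_lt.mpr (Int.natCast_nonneg a)
  norm_num [hlt]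
  by_cases hal : a < xs.length
  · have hmin : min (a : Int) (xs.length : Int) = (a : Int) := by omega
    rw [hmin, if_pos hal]
    have hcnt : ((((xs.length : Int)) - (a : Int) + 2 - 1) / 2).toNat = (xs.length - a + 1) / 2 := by
      omega
    rw [hcnt]
    set c := (xs.length - a + 1) / 2 with hc
    have hne : 0 < xs.length := by omega
    have hidx : ∀ k, k < c → a + 2 * k < xs.length := by intro k hk; omega
    have step1 : List.filterMap (fun k : Nat => xs[((a : Int) + 2 * (k : Int)).toNat]?) (List.range c)
        = (List.range c).map (fun k => xs.getD (a + 2 * k) (xs[0]'hne)) := by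
      rw [List.filterMap_congr (g := fun k => some (xs.getD (a + 2 * k) (xs[0]'hne))) ?_]
      · exact congrFun List.filterMap_eq_map _
      · intro k hk
        have hkc : k < c := List.mem_range.mp hk
        have hi : ((a : Int) + 2 * (k : Int)).toNat = a + 2 * k := by omega
        simp only [hi]
        rw [List.getElem?_eq_getElem (hidx k hkc), List.getD_eq_getElem _ _ (hidx k hkc)]
    rw [step1]
    apply List.ext_getElem?
    intro k
    have hev := (pv_getElem?_joint (xs.drop a)).1 k
    rw [hev, List.getElem?_drop]
    by_cases hk : k < c
    · simp only [List.getElem?_map, List.getElem?_range hk, Option.map_some]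
      rw [List.getElem?_eq_getElem (by omega : a + 2 * k < xs.length),
        List.getD_eq_getElem _ _ (hidx k hk)]
    · have hr : (List.range c)[k]? = none := List.getElem?_eq_none (by simpa using Nat.le_of_not_lt hk)
      simp only [List.getElem?_map, hr, Option.map_none]
      exact (List.getElem?_eq_none (by omega)).symm
  · have hdrop : xs.drop a = [] := List.drop_eq_nil_of_le (by omega)
    have hmin : min (a : Int) (xs.length : Int) = (xs.length : Int) := by omega
    rw [hmin, if_neg hal, hdrop]
    simp [pvEvens]

lemma pvEvens_drop_one {α : Type} (xs : List α) : pvEvens (xs.drop 1) = pvOdds xs := by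
  cases xs with
  | nil => rfl
  | cons x t => simp [pvOdds]

-- reading the element at i < cs.length through pyGetD on the mapped ord list
lemma pyGetD_ord (cs : List Char) (i : Nat) (h : i < cs.length) :
    PySem.List.pyGetD (cs.map (fun c => (c.toNat : Int))) (i : Int) 0 = ((cs[i]'h).toNat : Int) := by
  rw [PySem.List.pyGetD_natCast]
  have : (cs.map (fun c => (c.toNat : Int)))[i]? = some ((cs[i]'h).toNat : Int) := by
    simp [List.getElem?_map, List.getElem?_eq_getElem h]
  simp [List.getD, this]

-- A's loop from an even index i equals the two staged parity sums over the remaining suffix.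
lemma loopA_eq_parity_sums (cs : List Char) (e : Nat) :
    ∀ (k i : Nat) (acc : Int), cs.length - i ≤ k → i % 2 = 0 →
      (PySem.List.pyRange (i : Int) (cs.length : Int) 1).foldl
        (fun s pos =>
          if PySem.Int.mod pos 2 = 0 then
            s + (PySem.List.pyGetD (cs.map (fun c => (c.toNat : Int))) pos 0) ^ e
          else s + PySem.List.pyGetD (cs.map (fun c => (c.toNat : Int))) pos 0) acc
      = acc + ((pvEvens (cs.drop i)).map (fun c => ((c.toNat : Int)) ^ e)).sum
            + ((pvOdds (cs.drop i)).map (fun c => (c.toNat : Int))).sum := by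
  intro k
  induction k with
  | zero =>
    intro i acc hk _
    have hge : cs.length ≤ i := by omega
    rw [PySem.List.pyRange_one_eq_nil (by exact_mod_cast hge),
      List.drop_eq_nil_of_le hge]
    simp [pvEvens, pvOdds]
  | succ k ih =>
    intro i acc hk hpar
    by_cases h1 : i + 1 < cs.length
    · have hi : (i : Int) < (cs.length : Int) := by exact_mod_cast (by omega : i < cs.length)
      rw [PySem.List.pyRange_one_cons hi]
      have hi1 : ((i : Int) + 1) < (cs.length : Int) := by
        exact_mod_cast (by omega : i + 1 < cs.length)
      rw [PySem.List.pyRange_one_cons hi1]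
      simp only [List.foldl_cons]
      have hm0 : PySem.Int.mod (i : Int) 2 = 0 := by
        rw [PySem.Int.mod_eq_emod_of_pos (by norm_num)]; omega
      have hm1 : PySem.Int.mod ((i : Int) + 1) 2 ≠ 0 := by
        rw [PySem.Int.mod_eq_emod_of_pos (by norm_num)]; omega
      rw [if_pos hm0, if_neg hm1]
      rw [pyGetD_ord cs i (by omega)]
      rw [show ((i : Int) + 1) = ((i + 1 : Nat) : Int) by push_cast; ring]
      rw [pyGetD_ord cs (i + 1) (by omega)]
      rw [show ((i + 1 : Nat) : Int) + 1 = ((i + 2 : Nat) : Int) by push_cast; ring]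
      rw [ih (i + 2) _ (by omega) (by omega)]
      have hd : cs.drop i = cs[i]'(by omega) :: cs[i+1]'(by omega) :: cs.drop (i + 2) := by
        rw [List.drop_eq_getElem_cons (by omega : i < cs.length)]
        congr 1
        rw [List.drop_eq_getElem_cons (by omega : i + 1 < cs.length)]
      rw [hd]
      simp only [pvEvens, pvOdds, List.map_cons, List.sum_cons]
      ring
    · by_cases h2 : i < cs.length
      · -- i = n - 1: one final even step
        have hi : (i : Int) < (cs.length : Int) := by exact_mod_cast h2
        rw [PySem.List.pyRange_one_cons hi,
          PySem.List.pyRange_one_eq_nil (by exact_mod_cast (by omega : cs.length ≤ i + 1))]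
        simp only [List.foldl_cons, List.foldl_nil]
        have hm0 : PySem.Int.mod (i : Int) 2 = 0 := by
          rw [PySem.Int.mod_eq_emod_of_pos (by norm_num)]; omega
        rw [if_pos hm0, pyGetD_ord cs i h2]
        have hd : cs.drop i = [cs[i]'h2] := by
          rw [List.drop_eq_getElem_cons h2, List.drop_eq_nil_of_le (by omega)]
        rw [hd]
        simp [pvEvens, pvOdds]
      · rw [PySem.List.pyRange_one_eq_nil (by exact_mod_cast (by omega : cs.length ≤ i)),
          List.drop_eq_nil_of_le (by omega)]
        simp [pvEvens, pvOdds]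

-- ===== VERDICT (by name: the statement is the Claim_ definition above) =====
theorem my_hash_func_spec : Claim_equal_my_hash_func := by
  intro key _
  unfold Spec_my_hash_func my_hash_func my_hash_func_alt
  simp only []
  have h := loopA_eq_parity_sums key.toList (key.toList.length - 1) key.toList.length 0 0
    (by omega) (by omega)
  rw [Nat.cast_zero] at h
  rw [h]
  have s0 := slice?_step_two key.toList 0
  have s1 := slice?_step_two key.toList 1
  rw [Nat.cast_zero] at s0
  rw [Nat.cast_one] at s1
  rw [s0, s1, List.drop_zero, pvEvens_drop_one]
  simp
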